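-- pv_equiv track=rewrite | github.com/S1h2i3v4u/Hospital-Appointment-Booking-System | analyze_report.py | classify_report
-- ===== SOURCE A (Python) =====
-- def classify_report(content):
--     abnormal_keywords = [
--         'opacity', 'infiltrate', 'lesion', 'mass', 'consolidation', 'collapse',
--         'effusion', 'abnormal', 'nodule', 'pneumonia', 'edema', 'fracture',
--         'pneumothorax', 'ARDS', 'tear', 'sprain', 'contusion', 'infection'
--     ]
--     for word in abnormal_keywords:
--         if word.lower() in content.lower():
--             return "Abnormal"
--     return "Normal"
-- ===== SOURCE B (Python) =====
-- ABNORMAL_KEYWORDS = [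
--     'opacity', 'infiltrate', 'lesion', 'mass', 'consolidation', 'collapse',
--     'effusion', 'abnormal', 'nodule', 'pneumonia', 'edema', 'fracture',
--     'pneumothorax', 'ards', 'tear', 'sprain', 'contusion', 'infection'
-- ]
--
-- def classify_report(content):
--     # Single left-to-right scan: at each position, test whether any keyword
--     # starts there, instead of 18 independent substring searches.
--     text = content.lower()
--     for i in range(len(text)):
--         if any(text.startswith(kw, i) for kw in ABNORMAL_KEYWORDS):
--             return "Abnormal"
--     return "Normal"
-- ===== Notes on version B (the rewrite author's own statement) =====
-- stated objective: alternative
-- what changed: B lowercases the text once and makes a single left-to-right scan over positions, testing at each position whether any keyword starts there, instead of A's 18 separate substring searches each re-lowercasing the content.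
import Mathlib
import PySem

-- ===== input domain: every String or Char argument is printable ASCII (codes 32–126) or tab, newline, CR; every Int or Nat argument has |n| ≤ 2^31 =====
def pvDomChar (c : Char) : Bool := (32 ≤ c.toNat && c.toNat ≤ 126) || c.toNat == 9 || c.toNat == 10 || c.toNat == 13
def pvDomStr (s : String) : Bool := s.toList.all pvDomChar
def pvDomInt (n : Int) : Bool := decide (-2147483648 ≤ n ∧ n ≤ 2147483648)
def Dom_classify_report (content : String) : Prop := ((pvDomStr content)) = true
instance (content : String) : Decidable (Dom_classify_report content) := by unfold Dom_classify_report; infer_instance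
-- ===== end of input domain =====

-- B: one left-to-right scan over positions testing every keyword at each position,
-- instead of A's 18 independent substring searches (objective: alternative).

-- ===== PORT A =====
def pvKeywordsA : List String :=
  ["opacity", "infiltrate", "lesion", "mass", "consolidation", "collapse",
   "effusion", "abnormal", "nodule", "pneumonia", "edema", "fracture",
   "pneumothorax", "ARDS", "tear", "sprain", "contusion", "infection"]

-- the 'for word in abnormal_keywords' loop with its early return
def classifyA_loop (content : String) : List String → String
  | [] => "Normal"
  | w :: rest =>
      if PySem.Str.isIn (PySem.Str.lower w) (PySem.Str.lower content) then "Abnormal"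
      else classifyA_loop content rest

def classify_report (content : String) : String :=
  classifyA_loop content pvKeywordsA

-- ===== PORT B =====
def pvKeywordsB : List (List Char) :=
  ["opacity".toList, "infiltrate".toList, "lesion".toList, "mass".toList,
   "consolidation".toList, "collapse".toList, "effusion".toList, "abnormal".toList,
   "nodule".toList, "pneumonia".toList, "edema".toList, "fracture".toList,
   "pneumothorax".toList, "ards".toList, "tear".toList, "sprain".toList,
   "contusion".toList, "infection".toList]

-- the 'for i in range(len(text))' scan: recursion over the suffix starting at i;
-- text.startswith(kw, i) is 'kw.isPrefixOf (text.drop i)'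
def classifyB_scan (K : List (List Char)) : List Char → String
  | [] => "Normal"
  | s@(_ :: rest) =>
      if K.any (fun kw => kw.isPrefixOf s) then "Abnormal"
      else classifyB_scan K rest

def classify_report_alt (content : String) : String :=
  classifyB_scan pvKeywordsB (PySem.Chars.lower content.toList)

-- ===== PRECONDITION & SPEC =====
def Spec_classify_report (content : String) (out : String) : Prop := out = classify_report_alt content
instance (content : String) (out : String) : Decidable (Spec_classify_report content out) := by unfold Spec_classify_report; infer_instance

-- ===== CLAIM (what is proved, stated in full; the proofs are below) =====
def Claim_equal_classify_report : Prop := ∀ (content : String), Dom_classify_report content → Spec_classify_report content (classify_report content)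

-- ===== LEMMAS AND PROOFS =====

-- A's early-return loop returns "Abnormal" iff some keyword's membership test fires
theorem classifyA_loop_eq (content : String) (K : List String) :
    classifyA_loop content K =
      if ∃ w ∈ K, PySem.Str.isIn (PySem.Str.lower w) (PySem.Str.lower content) = true
      then "Abnormal" else "Normal" := by
  induction K with
  | nil => simp [classifyA_loop]
  | cons w rest ih =>
      simp only [classifyA_loop, ih]
      by_cases h : PySem.Str.isIn (PySem.Str.lower w) (PySem.Str.lower content) = true
      · rw [if_pos h, if_pos ⟨w, List.mem_cons_self .., h⟩]
      · rw [if_neg h]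
        by_cases h2 : ∃ v ∈ rest, PySem.Str.isIn (PySem.Str.lower v) (PySem.Str.lower content) = true
        · rcases h2 with ⟨v, hv, hvt⟩
          rw [if_pos ⟨v, hv, hvt⟩, if_pos ⟨v, List.mem_cons_of_mem _ hv, hvt⟩]
        · rw [if_neg h2, if_neg]
          rintro ⟨v, hv, hvt⟩
          rcases List.mem_cons.mp hv with rfl | hv'
          · exact h hvt
          · exact h2 ⟨v, hv', hvt⟩

-- B's positional scan returns "Abnormal" iff some keyword is an infix
theorem classifyB_scan_eq (K : List (List Char)) (hK : ∀ kw ∈ K, kw ≠ ([] : List Char)) :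
    ∀ s : List Char,
      classifyB_scan K s = if ∃ kw ∈ K, kw <:+: s then "Abnormal" else "Normal" := by
  intro s
  induction s with
  | nil =>
      simp only [classifyB_scan]
      rw [if_neg]
      rintro ⟨kw, hkw, h⟩
      exact hK kw hkw (List.eq_nil_of_infix_nil h)
  | cons c rest ih =>
      simp only [classifyB_scan, ih]
      by_cases hp : ∃ kw ∈ K, kw <+: c :: rest
      · have hb : (K.any fun kw => kw.isPrefixOf (c :: rest)) = true := by
          rcases hp with ⟨kw, hkw, h⟩
          exact List.any_eq_true.mpr ⟨kw, hkw, List.isPrefixOf_iff_prefix.mpr h⟩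
        rcases hp with ⟨kw, hkw, h⟩
        rw [if_pos hb, if_pos ⟨kw, hkw, h.isInfix⟩]
      · have hb : ¬ (K.any fun kw => kw.isPrefixOf (c :: rest)) = true := by
          intro h
          rcases List.any_eq_true.mp h with ⟨kw, hkw, hpref⟩
          exact hp ⟨kw, hkw, List.isPrefixOf_iff_prefix.mp hpref⟩
        rw [if_neg hb]
        by_cases hr : ∃ kw ∈ K, kw <:+: rest
        · rcases hr with ⟨kw, hkw, h⟩
          rw [if_pos ⟨kw, hkw, h⟩,
              if_pos ⟨kw, hkw, h.trans (List.suffix_cons c rest).isInfix⟩]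
        · rw [if_neg hr, if_neg]
          rintro ⟨kw, hkw, h⟩
          rcases List.infix_cons_iff.mp h with hpre | hinf
          · exact hp ⟨kw, hkw, hpre⟩
          · exact hr ⟨kw, hkw, hinf⟩

-- the two existential conditions coincide keyword by keyword
theorem conditions_iff (content : String) :
    (∃ w ∈ pvKeywordsA, PySem.Str.isIn (PySem.Str.lower w) (PySem.Str.lower content) = true)
      ↔ (∃ kw ∈ pvKeywordsB, kw <:+: PySem.Chars.lower content.toList) := by
  have hmap : pvKeywordsB = pvKeywordsA.map (fun w => PySem.Chars.lower w.toList) := by decide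
  constructor
  · rintro ⟨w, hw, h⟩
    refine ⟨PySem.Chars.lower w.toList, ?_, ?_⟩
    · rw [hmap]; exact List.mem_map_of_mem hw
    · exact (PySem.Chars.isIn_iff_infix _ _).mp (by simpa [pysem] using h)
  · rintro ⟨kw, hkw, h⟩
    rw [hmap] at hkw
    rcases List.mem_map.mp hkw with ⟨w, hw, rfl⟩
    exact ⟨w, hw, by simpa [pysem] using (PySem.Chars.isIn_iff_infix _ _).mpr h⟩

-- ===== VERDICT (by name: the statement is the Claim_ definition above) =====
theorem classify_report_spec : Claim_equal_classify_report := by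
  intro content _
  show classify_report content = classify_report_alt content
  unfold classify_report classify_report_alt
  rw [classifyA_loop_eq, classifyB_scan_eq pvKeywordsB (by decide)]
  exact if_congr (conditions_iff content) rfl rfl
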